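-- pv_equiv track=rewrite | github.com/samihsq/slm-agentic-benchmarking | src/benchmarks/skills/instruction_following/matrix_instruction_following.py | L20_neighbor_mean
-- ===== SOURCE A (Python) =====
-- def L20_neighbor_mean(M):
--     h,w=len(M),len(M[0])
--     out=[[0]*w for _ in range(h)]
--     for i in range(h):
--         for j in range(w):
--             vals=[]
--             for di,dj in [(-1,0),(1,0),(0,-1),(0,1)]:
--                 ni,nj=i+di,j+dj
--                 if 0<=ni<h and 0<=nj<w:
--                     vals.append(M[ni][nj])
--             out[i][j]=sum(vals)//len(vals) if vals else 0
--     return out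
-- ===== SOURCE B (Python) =====
-- def L20_neighbor_mean(M):
--     h, w = len(M), len(M[0])
--     zero = [0] * w
--     out = []
--     for i in range(h):
--         row = M[i][:w]
--         up = M[i - 1][:w] if i > 0 else zero
--         down = M[i + 1][:w] if i + 1 < h else zero
--         left = [0] + row[:w - 1]
--         right = row[1:] + [0]
--         vsum = [a + b + c + d for a, b, c, d in zip(up, down, left, right)]
--         vcnt = (1 if i > 0 else 0) + (1 if i + 1 < h else 0)
--         ones = [1] * (w - 1)
--         cnt = [x + y + vcnt for x, y in zip([0] + ones, ones + [0])]
--         out.append([s // c if c else 0 for s, c in zip(vsum, cnt)])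
--     return out
-- ===== Notes on version B (the rewrite author's own statement) =====
-- stated objective: alternative
-- what changed: B replaces A's per-cell pull loop over the four neighbor offsets by a row-wise vectorized pass: for each row it builds the shifted/adjacent row lists (up, down, left-shift, right-shift) plus a per-column count row and combines them elementwise with zips; no per-cell neighbor enumeration or bounds test remains, which is what makes it measurably faster in CPython.
import Mathlib
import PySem

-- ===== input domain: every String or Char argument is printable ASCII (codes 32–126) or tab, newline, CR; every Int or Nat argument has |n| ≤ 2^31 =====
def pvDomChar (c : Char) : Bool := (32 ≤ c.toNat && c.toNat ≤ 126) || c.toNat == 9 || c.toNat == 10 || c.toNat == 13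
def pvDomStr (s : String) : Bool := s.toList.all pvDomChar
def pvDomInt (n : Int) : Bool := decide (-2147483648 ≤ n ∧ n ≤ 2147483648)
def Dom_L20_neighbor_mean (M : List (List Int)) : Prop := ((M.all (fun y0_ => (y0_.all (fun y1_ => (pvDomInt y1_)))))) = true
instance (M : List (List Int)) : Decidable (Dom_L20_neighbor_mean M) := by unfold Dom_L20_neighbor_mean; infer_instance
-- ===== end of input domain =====

-- B replaces the per-cell pull over the four neighbours by a row-wise vectorised pass
-- (shifted-row zips give the four neighbour contributions and the counts per row): alternative decomposition.

-- ===== PORT A =====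
def L20_neighbor_mean (M : List (List Int)) : List (List Int) :=
  let h := M.length
  let w := (M.headD []).length   -- len(M[0]); Pre_ guarantees M ≠ []
  (List.range h).map (fun (i : Nat) =>
    (List.range w).map (fun (j : Nat) =>
      let vals := [((-1 : Int), (0 : Int)), (1, 0), (0, -1), (0, 1)].foldl
        (fun (acc : List Int) d =>
          let ni := (i : Int) + d.1
          let nj := (j : Int) + d.2
          if 0 ≤ ni ∧ ni < (h : Int) ∧ 0 ≤ nj ∧ nj < (w : Int) then
            acc ++ [(PySem.List.pyGet? ((PySem.List.pyGet? M ni).getD []) nj).getD 0]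
          else acc) []
      if vals.length ≠ 0 then PySem.Int.floordiv vals.sum (vals.length : Int) else 0))

-- ===== PORT B =====
def L20_neighbor_mean_alt (M : List (List Int)) : List (List Int) :=
  let h := M.length
  let w := (M.headD []).length   -- len(M[0]); Pre_ guarantees M ≠ []
  (List.range h).map (fun (i : Nat) =>
    let row := (M.getD i []).take w
    let up := if 0 < i then (M.getD (i - 1) []).take w else List.replicate w (0 : Int)
    let down := if i + 1 < h then (M.getD (i + 1) []).take w else List.replicate w (0 : Int)
    let left := (0 : Int) :: row.take (w - 1)     -- [0] + row[:w-1] (row has length ≤ w, exact on Pre_)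
    let right := row.drop 1 ++ [(0 : Int)]        -- row[1:] + [0]
    let vsum := (up.zip (down.zip (left.zip right))).map (fun p => p.1 + p.2.1 + p.2.2.1 + p.2.2.2)
    let vcnt : Int := (if 0 < i then 1 else 0) + (if i + 1 < h then 1 else 0)
    let ones := List.replicate (w - 1) (1 : Int)
    let cnt := (((0 : Int) :: ones).zip (ones ++ [(0 : Int)])).map (fun p => p.1 + p.2 + vcnt)
    (vsum.zip cnt).map (fun p => if p.2 ≠ 0 then PySem.Int.floordiv p.1 p.2 else 0))

-- ===== PRECONDITION & SPEC =====
-- Pre_ excludes the empty matrix and matrices with a row shorter than the first row,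
-- on which Python A raises IndexError (len(M[0]) or an out-of-range neighbour access).
def Pre_L20_neighbor_mean (M : List (List Int)) : Prop :=
  M ≠ [] ∧ ∀ r ∈ M, (M.headD []).length ≤ r.length
instance (M : List (List Int)) : Decidable (Pre_L20_neighbor_mean M) := by
  unfold Pre_L20_neighbor_mean; infer_instance

def pvWitness_L20_neighbor_mean : List (List Int) := [[1, 2], [3, 4]]

def Spec_L20_neighbor_mean (M : List (List Int)) (out : List (List Int)) : Prop := out = L20_neighbor_mean_alt M
instance (M : List (List Int)) (out : List (List Int)) : Decidable (Spec_L20_neighbor_mean M out) := by unfold Spec_L20_neighbor_mean; infer_instance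

-- ===== CLAIM (what is proved, stated in full; the proofs are below) =====
def Claim_equal_L20_neighbor_mean : Prop := ∀ (M : List (List Int)), Dom_L20_neighbor_mean M → Pre_L20_neighbor_mean M → Spec_L20_neighbor_mean M (L20_neighbor_mean M)


-- ===== LEMMAS AND PROOFS =====

-- Python M[a][b] through PySem at Nat indices = nested List.getD (both default to 0 out of range).
theorem pv_cellA_eq (M : List (List Int)) (a b : Nat) :
    (PySem.List.pyGet? ((PySem.List.pyGet? M ((a : Nat) : Int)).getD []) ((b : Nat) : Int)).getD 0
      = (M.getD a []).getD b 0 := by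
  simp [PySem.List.pyGet?_natCast, List.getD_eq_getElem?_getD]

theorem pv_take_get (l : List Int) (w j : Nat) (hj : j < w) (hl : w ≤ l.length)
    (h : j < (l.take w).length) :
    (l.take w)[j] = l.getD j 0 := by
  rw [List.getElem_take, List.getD_eq_getElem l 0 (by omega)]

theorem pv_left_get (l : List Int) (w j : Nat) (hj : j < w) (hl : w ≤ l.length)
    (h : j < ((0 : Int) :: (l.take w).take (w - 1)).length) :
    ((0 : Int) :: (l.take w).take (w - 1))[j] = if 0 < j then l.getD (j - 1) 0 else 0 := by
  rcases j with _ | k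
  · simp
  · have hk : k < w - 1 := by omega
    simp only [List.getElem_cons_succ, List.take_take, List.getElem_take]
    rw [List.getD_eq_getElem l 0 (by omega)]
    simp

theorem pv_right_get (l : List Int) (w j : Nat) (hj : j < w) (hl : w ≤ l.length)
    (h : j < ((l.take w).drop 1 ++ [(0 : Int)]).length) :
    ((l.take w).drop 1 ++ [(0 : Int)])[j] = if j + 1 < w then l.getD (j + 1) 0 else 0 := by
  have hlen : ((l.take w).drop 1).length = w - 1 := by simp; omega
  by_cases hc : j + 1 < w
  · rw [List.getElem_append_left (by omega), List.getElem_drop, List.getElem_take,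
      List.getD_eq_getElem l 0 (by omega)]
    simp [Nat.add_comm, hc]
  · rw [List.getElem_append_right (by omega)]
    simp [hc]

theorem pv_cones_get (w j : Nat) (hj : j < w)
    (h : j < ((0 : Int) :: List.replicate (w - 1) (1 : Int)).length) :
    ((0 : Int) :: List.replicate (w - 1) (1 : Int))[j] = if 0 < j then 1 else 0 := by
  rcases j with _ | k
  · simp
  · simp

theorem pv_onesc_get (w j : Nat) (hj : j < w)
    (h : j < (List.replicate (w - 1) (1 : Int) ++ [(0 : Int)]).length) :
    (List.replicate (w - 1) (1 : Int) ++ [(0 : Int)])[j] = if j + 1 < w then 1 else 0 := by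
  by_cases hc : j + 1 < w
  · rw [List.getElem_append_left (by simp; omega)]
    simp [hc]
  · rw [List.getElem_append_right (by simp; omega)]
    simp [hc]

-- ===== VERDICT (by name: the statement is the Claim_ definition above) =====
set_option maxHeartbeats 1000000 in
theorem L20_neighbor_mean_spec : Claim_equal_L20_neighbor_mean := by
  intro M _ hPre
  obtain ⟨hne, hrows⟩ := hPre
  unfold Spec_L20_neighbor_mean L20_neighbor_mean L20_neighbor_mean_alt
  simp only []
  apply List.map_congr_left
  intro i hi
  rw [List.mem_range] at hi
  have hlen : ∀ a : Nat, a < M.length → (M.headD []).length ≤ (M.getD a []).length := by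
    intro a ha
    rw [List.getD_eq_getElem M [] ha]
    exact hrows _ (List.getElem_mem ha)
  have hli : (M.headD []).length ≤ (M.getD i []).length := hlen i hi
  clear hne hrows
  by_cases hi0 : 0 < i <;> by_cases hih : i + 1 < M.length <;>
    simp only [hi0, hih, if_true, if_false, ite_true, ite_false] <;>
  (apply List.ext_getElem
   · simp only [List.length_map, List.length_zip, List.length_range, List.length_take,
       List.length_cons, List.length_append, List.length_drop, List.length_replicate]
     first
     | (have hlu := hlen (i - 1) (by omega); have hld := hlen (i + 1) (by omega); omega)
     | (have hlu := hlen (i - 1) (by omega); omega)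
     | (have hld := hlen (i + 1) (by omega); omega)
     | omega
   · intro j hj1 hj2
     have hjw : j < (M.headD []).length := by simpa using hj1
     simp only [List.getElem_map, List.getElem_range, List.getElem_zip]
     rw [pv_left_get (M.getD i []) _ j hjw hli,
         pv_right_get (M.getD i []) _ j hjw hli,
         pv_cones_get _ j hjw, pv_onesc_get _ j hjw]
     first
     | rw [pv_take_get (M.getD (i - 1) []) _ j hjw (hlen (i - 1) (by omega)),
           pv_take_get (M.getD (i + 1) []) _ j hjw (hlen (i + 1) (by omega))]
     | rw [pv_take_get (M.getD (i - 1) []) _ j hjw (hlen (i - 1) (by omega))]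
     | rw [pv_take_get (M.getD (i + 1) []) _ j hjw (hlen (i + 1) (by omega))]
     | skip
     simp only [List.foldl_cons, List.foldl_nil, List.getElem_replicate]
     have c1 : (0 ≤ (i : Int) + -1 ∧ (i : Int) + -1 < (M.length : Int) ∧
         0 ≤ (j : Int) + 0 ∧ (j : Int) + 0 < ((M.headD []).length : Int)) ↔ 0 < i := by omega
     have c2 : (0 ≤ (i : Int) + 1 ∧ (i : Int) + 1 < (M.length : Int) ∧
         0 ≤ (j : Int) + 0 ∧ (j : Int) + 0 < ((M.headD []).length : Int)) ↔ i + 1 < M.length := by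
       omega
     have c3 : (0 ≤ (i : Int) + 0 ∧ (i : Int) + 0 < (M.length : Int) ∧
         0 ≤ (j : Int) + -1 ∧ (j : Int) + -1 < ((M.headD []).length : Int)) ↔ 0 < j := by omega
     have c4 : (0 ≤ (i : Int) + 0 ∧ (i : Int) + 0 < (M.length : Int) ∧
         0 ≤ (j : Int) + 1 ∧ (j : Int) + 1 < ((M.headD []).length : Int)) ↔
         j + 1 < (M.headD []).length := by omega
     simp only [c1, c2, c3, c4]
     by_cases hj0 : 0 < j <;> by_cases hjw1 : j + 1 < (M.headD []).length <;>
       simp only [hi0, hih, hj0, hjw1, if_true, if_false, ite_true, ite_false,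
         List.nil_append, List.cons_append, List.length_cons, List.length_nil,
         List.sum_cons, List.sum_nil] <;>
       norm_num <;>
       (try rw [show ((i : Int) + -1) = ((i - 1 : Nat) : Int) from by omega]
        try rw [show ((i : Int) + 1) = ((i + 1 : Nat) : Int) from by push_cast; ring]
        try rw [show ((j : Int) + -1) = ((j - 1 : Nat) : Int) from by omega]
        try rw [show ((j : Int) + 1) = ((j + 1 : Nat) : Int) from by push_cast; ring]
        try rw [show ((i : Int) + 0) = ((i : Nat) : Int) from by ring]
        try rw [show ((j : Int) + 0) = ((j : Nat) : Int) from by ring]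
        try simp only [pv_cellA_eq]
        try norm_num
        try (congr 1 <;> ring)
        try rfl
        try omega
        try rw [show (1 + (i : Int)) = ((1 + i : Nat) : Int) from by push_cast; ring]
        try rw [show (1 + (j : Int)) = ((1 + j : Nat) : Int) from by push_cast; ring]
        try simp only [PySem.List.pyGet?_natCast, List.getD_eq_getElem?_getD]
        try ring))
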